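-- pv_equiv track=rewrite | github.com/Arati-Jadhav/Python_Practice | Assignment_oops/String_class.py | vow_conso_repeate
-- ===== SOURCE A (Python) =====
-- def vow_conso_repeate(str1):  # 7
--     '''
--     Function repeates the vowels 3 times and consonants 2 times.
--     :param str1:
--     :return: temp
--     '''
--     temp = ""
--     vowels = "aeiou"
--     output = str1.split(" ")
--     for word in output:
--         for i in range(len(word)):
--             if word[i] in vowels:
--                 temp = temp + word[i] * 3
--             else:
--                 temp = temp + word[i] * 2
--         temp = temp + " "
--     return temp
-- ===== SOURCE B (Python) =====
-- def vow_conso_repeate(str1):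
--     '''
--     Function repeates the vowels 3 times and consonants 2 times.
--     Single flat pass over the characters (no split / nested word loop):
--     a space stays a single space, a vowel is tripled, anything else doubled,
--     and exactly one trailing space is appended at the end.
--     '''
--     parts = []
--     for c in str1:
--         if c == ' ':
--             parts.append(' ')
--         elif c in 'aeiou':
--             parts.append(c * 3)
--         else:
--             parts.append(c * 2)
--     parts.append(' ')
--     return ''.join(parts)
-- ===== Notes on version B (the rewrite author's own statement) =====
-- stated objective: simpler
-- what changed: Replaces split(' ') plus a nested word/index loop with a single flat pass over the characters that maps each character to its piece (space kept once, vowel tripled, other chars doubled) and joins once with one trailing piece appended.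
import Mathlib
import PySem

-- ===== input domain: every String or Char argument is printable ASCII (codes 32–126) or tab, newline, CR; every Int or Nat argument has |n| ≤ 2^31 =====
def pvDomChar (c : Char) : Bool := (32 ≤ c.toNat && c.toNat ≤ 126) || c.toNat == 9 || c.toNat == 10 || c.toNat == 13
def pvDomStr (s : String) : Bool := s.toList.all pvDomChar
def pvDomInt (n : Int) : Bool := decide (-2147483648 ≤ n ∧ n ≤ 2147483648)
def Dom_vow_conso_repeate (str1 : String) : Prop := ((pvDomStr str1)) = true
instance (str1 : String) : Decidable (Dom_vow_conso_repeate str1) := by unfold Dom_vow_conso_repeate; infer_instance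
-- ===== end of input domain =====

-- B replaces A's split(" ") + nested word/index loop by a single flat pass over the characters
-- (space kept once, vowel tripled, other chars doubled, one trailing space): simpler, same values.


-- ===== PORT A =====
-- temp = ""; vowels = "aeiou"; output = str1.split(" ");
-- for word in output: for i in range(len(word)): temp += word[i]*3 or *2; temp += " "
def vow_conso_repeate (str1 : String) : String :=
  let vowels : List Char := "aeiou".toList
  let output : List (List Char) := PySem.Chars.splitOn str1.toList " ".toList
  let temp : List Char :=
    output.foldl (fun temp word =>
      (PySem.List.pyRange 0 (PySem.Chars.len word) 1).foldl (fun t i =>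
        let c := PySem.List.pyGetD word i ' '   -- word[i]; i is always in range here
        if c ∈ vowels then t ++ [c, c, c] else t ++ [c, c]) temp
      ++ [' ']) []
  String.mk temp

-- ===== PORT B =====
-- the piece contributed by one character: ' ' → " ", vowel → c*3, else c*2
def pvPiece (c : Char) : List Char :=
  if c = ' ' then [' ']
  else if c ∈ "aeiou".toList then [c, c, c]
  else [c, c]

def vow_conso_repeate_alt (str1 : String) : String :=
  let parts : List (List Char) := str1.toList.foldl (fun ps c => ps ++ [pvPiece c]) []
  String.mk (PySem.Chars.join [] (parts ++ [[' ']]))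

-- ===== PRECONDITION & SPEC =====
def Spec_vow_conso_repeate (str1 : String) (out : String) : Prop := out = vow_conso_repeate_alt str1
instance (str1 : String) (out : String) : Decidable (Spec_vow_conso_repeate str1 out) := by unfold Spec_vow_conso_repeate; infer_instance

-- ===== CLAIM (what is proved, stated in full; the proofs are below) =====
def Claim_equal_vow_conso_repeate : Prop := ∀ (str1 : String), Dom_vow_conso_repeate str1 → Spec_vow_conso_repeate str1 (vow_conso_repeate str1)

-- ===== LEMMAS AND PROOFS =====

-- a direct structural single-space split, used to characterise PySem.Chars.splitOn on sep " "
def pvSplitSp (cur : List Char) : List Char → List (List Char)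
  | [] => [cur]
  | c :: rest => if c = ' ' then cur :: pvSplitSp [] rest else pvSplitSp (cur ++ [c]) rest

theorem pvGo_eq (fuel : Nat) : ∀ (l cur : List Char) (acc : List (List Char)), l.length < fuel →
    PySem.Chars.splitOn.go [' '] fuel l cur acc = acc.reverse ++ pvSplitSp cur.reverse l := by
  induction fuel with
  | zero => intro l cur acc h; omega
  | succ n ih =>
    intro l cur acc h
    cases l with
    | nil =>
      rw [PySem.Chars.splitOn.go.eq_def]
      simp [pvSplitSp]
    | cons c rest =>
      rw [PySem.Chars.splitOn.go.eq_def]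
      by_cases hc : c = ' '
      · subst hc
        have hpre : [' '].isPrefixOf (' ' :: rest) = true := by simp [List.isPrefixOf]
        simp only [hpre, if_true, List.length_cons, List.length_nil, List.drop_succ_cons, List.drop_zero]
        rw [ih rest [] (cur.reverse :: acc) (by simpa using Nat.lt_of_succ_lt_succ h)]
        simp [pvSplitSp]
      · have hpre : [' '].isPrefixOf (c :: rest) = false := by
          simp [List.isPrefixOf]; exact fun h' => (hc h'.symm).elim
        simp only [hpre, Bool.false_eq_true, if_false]
        rw [ih rest (c :: cur) acc (by simpa using Nat.lt_of_succ_lt_succ h)]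
        simp [pvSplitSp, hc]

theorem pvSplitOn_eq (cs : List Char) :
    PySem.Chars.splitOn cs [' '] = pvSplitSp [] cs := by
  have := pvGo_eq (cs.length + 1) cs [] [] (by omega)
  simpa [PySem.Chars.splitOn] using this

-- the per-char piece A produces inside a word (where c ≠ ' ')
def pvRep (c : Char) : List Char :=
  if c ∈ "aeiou".toList then [c, c, c] else [c, c]

theorem pvInner_eq (word : List Char) (temp : List Char) :
    (PySem.List.pyRange 0 (PySem.Chars.len word) 1).foldl (fun t i =>
      let c := PySem.List.pyGetD word i ' '
      if c ∈ "aeiou".toList then t ++ [c, c, c] else t ++ [c, c]) temp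
    = temp ++ word.flatMap pvRep := by
  have h1 := PySem.List.foldl_pyRange_zero_pyGetD' word ' '
      (fun t c => if c ∈ "aeiou".toList then t ++ [c, c, c] else t ++ [c, c]) temp
  simp only [PySem.Chars.len_eq]
  rw [show (PySem.List.pyRange 0 (word.length : Int) 1) = PySem.List.pyRange 0 (word.length : Int) from rfl]
  rw [h1]
  have : ∀ (t : List Char) (c : Char),
      (if c ∈ "aeiou".toList then t ++ [c, c, c] else t ++ [c, c]) = t ++ pvRep c := by
    intro t c; unfold pvRep; split_ifs <;> rfl
  simp only [this]
  exact PySem.List.foldl_append_eq_flatMap pvRep word temp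

-- A's outer fold over the single-space split equals the flat per-character pass
theorem pvMain (l : List Char) : ∀ (cur temp : List Char),
    (pvSplitSp cur l).foldl (fun temp word => temp ++ word.flatMap pvRep ++ [' ']) temp
    = temp ++ cur.flatMap pvRep ++ l.flatMap pvPiece ++ [' '] := by
  induction l with
  | nil => intro cur temp; simp [pvSplitSp]
  | cons c rest ih =>
    intro cur temp
    by_cases hc : c = ' '
    · subst hc
      simp only [pvSplitSp, if_true, List.foldl_cons]
      rw [ih [] (temp ++ cur.flatMap pvRep ++ [' '])]
      simp [pvPiece]
    · simp only [pvSplitSp, if_neg hc]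
      rw [ih (cur ++ [c]) temp]
      have : pvPiece c = pvRep c := by simp [pvPiece, pvRep, hc]
      simp [this]

theorem pvParts (cs : List Char) :
    cs.foldl (fun ps c => ps ++ [pvPiece c]) ([] : List (List Char)) = cs.map pvPiece := by
  induction cs using List.reverseRecOn with
  | nil => simp
  | append_singleton xs x ih => simp [ih]

theorem pvJoinNil (parts : List (List Char)) : PySem.Chars.join [] parts = parts.flatten := by
  simp [PySem.Chars.join, List.intercalate]
  induction parts with
  | nil => simp
  | cons p ps ih => cases ps <;> simp_all [List.intersperse]

-- ===== VERDICT (by name: the statement is the Claim_ definition above) =====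
theorem vow_conso_repeate_spec : Claim_equal_vow_conso_repeate := by
  intro str1 _
  unfold Spec_vow_conso_repeate vow_conso_repeate vow_conso_repeate_alt
  simp only [pvParts, pvJoinNil]
  rw [show (" ".toList) = [' '] from rfl, pvSplitOn_eq]
  have hfold : (pvSplitSp [] str1.toList).foldl
      (fun temp word =>
        (PySem.List.pyRange 0 (PySem.Chars.len word) 1).foldl (fun t i =>
          let c := PySem.List.pyGetD word i ' '
          if c ∈ "aeiou".toList then t ++ [c, c, c] else t ++ [c, c]) temp ++ [' ']) []
      = (pvSplitSp [] str1.toList).foldl (fun temp word => temp ++ word.flatMap pvRep ++ [' ']) [] := by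
    apply PySem.List.foldl_congr_mem
    intro temp word _
    rw [pvInner_eq]
  rw [hfold, pvMain]
  simp [List.flatMap]
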